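-- pv_equiv track=rewrite | github.com/Azure/azure-sdk-tools | tools/azure-rest-api-specs-examples-automation/dotnet/main.py | get_dotnet_using_statements
-- ===== SOURCE A (Python) =====
-- from typing import List
--
-- def get_dotnet_using_statements(lines: List[str]) -> List[str]:
--     lines_using_statements = []
--     for line in lines:
--         if line.startswith('using '):
--             lines_using_statements.append(line)
--         elif line.startswith('namespace ') and not line.rstrip().endswith(".Samples"):
--             namespace = line[len('namespace '):].strip()
--             lines_using_statements.append(f'using {namespace};\n')
--             break
--     return lines_using_statements
-- ===== SOURCE B (Python) =====
-- from typing import List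
--
--
-- def get_dotnet_using_statements(lines: List[str]) -> List[str]:
--     def is_stop(line: str) -> bool:
--         return line.startswith('namespace ') and not line.rstrip().endswith('.Samples')
--
--     stop = next((i for i, line in enumerate(lines) if is_stop(line)), len(lines))
--     head = lines[:stop]
--     tail = lines[stop:]
--     result = [line for line in head if line.startswith('using ')]
--     if tail:
--         namespace = tail[0][len('namespace '):].strip()
--         result.append(f'using {namespace};\n')
--     return result
-- ===== Notes on version B (the rewrite author's own statement) =====
-- stated objective: alternative
-- what changed: Replaces A's single iterate-and-break loop by a boundary computation (index of the first non-.Samples namespace line) followed by a prefix filter over the slice before it plus an optional appended using-line.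
import Mathlib
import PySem

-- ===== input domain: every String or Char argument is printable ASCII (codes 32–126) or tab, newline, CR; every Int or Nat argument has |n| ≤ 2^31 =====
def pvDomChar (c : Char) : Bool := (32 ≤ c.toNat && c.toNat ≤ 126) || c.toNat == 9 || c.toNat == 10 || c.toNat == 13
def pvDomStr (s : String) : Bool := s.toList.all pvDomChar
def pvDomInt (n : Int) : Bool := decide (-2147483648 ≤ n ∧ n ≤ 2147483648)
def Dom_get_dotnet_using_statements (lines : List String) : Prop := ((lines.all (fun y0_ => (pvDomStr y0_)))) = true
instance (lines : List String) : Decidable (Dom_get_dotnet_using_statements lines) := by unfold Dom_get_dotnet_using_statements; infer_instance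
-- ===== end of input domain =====

-- ===== PORT A =====
-- Port of A: iterate over the lines, collecting 'using ' lines, stopping at the
-- first non-'.Samples' namespace line (appending its 'using …;\n' form).
def get_dotnet_using_statements : List String → List String
  | [] => []
  | line :: rest =>
    if PySem.Str.startswith line "using " then
      line :: get_dotnet_using_statements rest
    else if PySem.Str.startswith line "namespace "
        && !PySem.Str.endswith (PySem.Str.rstrip line) ".Samples" then
      ["using " ++ PySem.Str.strip (PySem.Str.slice line (some 10) none) ++ ";\n"]
    else
      get_dotnet_using_statements rest

-- ===== PORT B =====
-- B (one honest line): instead of A's iterate-and-break loop, B first computes the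
-- boundary index of the first stop line, then filters the prefix and appends the
-- optional using-line; same O(n) cost, a different decomposition.
def pvIsStop (line : String) : Bool :=
  PySem.Str.startswith line "namespace "
    && !PySem.Str.endswith (PySem.Str.rstrip line) ".Samples"

def pvUsingOf (line : String) : String :=
  "using " ++ PySem.Str.strip (PySem.Str.slice line (some 10) none) ++ ";\n"

def get_dotnet_using_statements_alt (lines : List String) : List String :=
  let stop : Nat := (lines.findIdx? pvIsStop).getD lines.length
  let head := PySem.List.slice lines none (some (stop : Int))
  let tail := PySem.List.slice lines (some (stop : Int)) none
  let result := head.filter (fun line => PySem.Str.startswith line "using ")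
  match tail with
  | [] => result
  | t :: _ => result ++ [pvUsingOf t]

-- ===== PRECONDITION & SPEC =====
def Spec_get_dotnet_using_statements (lines : List String) (out : List String) : Prop := out = get_dotnet_using_statements_alt lines
instance (lines : List String) (out : List String) : Decidable (Spec_get_dotnet_using_statements lines out) := by unfold Spec_get_dotnet_using_statements; infer_instance

-- ===== CLAIM (what is proved, stated in full; the proofs are below) =====
def Claim_equal_get_dotnet_using_statements : Prop := ∀ (lines : List String), Dom_get_dotnet_using_statements lines → Spec_get_dotnet_using_statements lines (get_dotnet_using_statements lines)

-- ===== LEMMAS AND PROOFS =====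

-- alt, with the slices rewritten to take/drop.
theorem alt_take_drop (lines : List String) :
    get_dotnet_using_statements_alt lines =
      ((lines.take ((lines.findIdx? pvIsStop).getD lines.length)).filter
          (fun line => PySem.Str.startswith line "using ")) ++
        (match lines.drop ((lines.findIdx? pvIsStop).getD lines.length) with
          | [] => []
          | t :: _ => [pvUsingOf t]) := by
  unfold get_dotnet_using_statements_alt
  simp only [PySem.List.slice_to_natCast, PySem.List.slice_from_natCast]
  cases lines.drop ((lines.findIdx? pvIsStop).getD lines.length) <;> simp

-- A line starting with 'using ' cannot also start with 'namespace '.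
theorem using_not_ns (l : String)
    (h : PySem.Str.startswith l "using " = true) :
    PySem.Str.startswith l "namespace " = false := by
  by_contra hc
  rw [Bool.not_eq_false] at hc
  rw [PySem.Str.startswith_eq, PySem.Chars.startswith_iff] at h hc
  obtain ⟨t1, e1⟩ := h
  obtain ⟨t2, e2⟩ := hc
  have e := e1.trans e2.symm
  have h2 : (some 'u' : Option Char) = some 'n' := by
    have h0 := congrArg List.head? e
    simp at h0
  exact absurd (Option.some.inj h2) (by decide)

theorem using_not_stop (l : String)
    (h : PySem.Str.startswith l "using " = true) : pvIsStop l = false := by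
  unfold pvIsStop
  rw [using_not_ns l h, Bool.false_and]

theorem a_eq_alt : ∀ lines : List String,
    get_dotnet_using_statements lines = get_dotnet_using_statements_alt lines
  | [] => by rfl
  | line :: rest => by
    have ih := a_eq_alt rest
    rw [alt_take_drop] at ih
    rw [alt_take_drop, List.findIdx?_cons]
    by_cases hs : pvIsStop line = true
    · have hu : PySem.Str.startswith line "using " = false := by
        by_cases hc : PySem.Str.startswith line "using " = true
        · rw [using_not_stop line hc] at hs
          exact absurd hs (by simp)
        · simpa using hc
      simp [pvIsStop] at hs
      simp at hu
      simp [get_dotnet_using_statements, pvIsStop, pvUsingOf, hu, hs.1, hs.2]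
    · have hs' : pvIsStop line = false := by simpa using hs
      have hstep : (Option.map (fun i => i + 1) (rest.findIdx? pvIsStop)).getD
          (line :: rest).length = ((rest.findIdx? pvIsStop).getD rest.length) + 1 := by
        cases rest.findIdx? pvIsStop <;> simp
      by_cases hu : PySem.Str.startswith line "using " = true
      · have hn := using_not_ns line hu
        simp at hn hu
        simp [get_dotnet_using_statements, pvIsStop, hu, hn, ih]
      · have hu' : PySem.Str.startswith line "using " = false := by simpa using hu
        by_cases hn : PySem.Str.startswith line "namespace " = true
        · simp at hu' hn
          simp [pvIsStop] at hs'
          have he := hs' hn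
          simp [get_dotnet_using_statements, pvIsStop, hu', hn, he, ih]
        · have hn' : PySem.Str.startswith line "namespace " = false := by simpa using hn
          simp at hu' hn'
          simp [get_dotnet_using_statements, pvIsStop, hu', hn', ih]

-- ===== VERDICT (by name: the statement is the Claim_ definition above) =====
theorem get_dotnet_using_statements_spec : Claim_equal_get_dotnet_using_statements := by
  intro lines _
  exact a_eq_alt lines
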